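-- pv_equiv track=rewrite | github.com/Tejaswiprathap/Training | Day-4 (30-05-2024).py | reverse_string_preserve_special_chars
-- ===== SOURCE A (Python) =====
-- def reverse_string_preserve_special_chars(s):
--     alnum_chars = [c for c in s if c.isalnum()]
--     reversed_alnum_chars = alnum_chars[::-1]
--
--     result = []
--     index = 0
--     for char in s:
--         if char.isalnum():
--             result.append(reversed_alnum_chars[index])
--             index += 1
--         else:
--             result.append(char)
--
--     return ''.join(result)
-- ===== SOURCE B (Python) =====
-- def reverse_string_preserve_special_chars(s):
--     chars = list(s)
--     i, j = 0, len(chars) - 1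
--     while i < j:
--         if not chars[i].isalnum():
--             i += 1
--         elif not chars[j].isalnum():
--             j -= 1
--         else:
--             chars[i], chars[j] = chars[j], chars[i]
--             i += 1
--             j -= 1
--     return ''.join(chars)
-- ===== Notes on version B (the rewrite author's own statement) =====
-- stated objective: alternative
-- what changed: Replaces A's three passes (collect alnum chars, reverse them, rebuild with an index) by a single in-place two-pointer converging swap over a list copy.
import Mathlib
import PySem

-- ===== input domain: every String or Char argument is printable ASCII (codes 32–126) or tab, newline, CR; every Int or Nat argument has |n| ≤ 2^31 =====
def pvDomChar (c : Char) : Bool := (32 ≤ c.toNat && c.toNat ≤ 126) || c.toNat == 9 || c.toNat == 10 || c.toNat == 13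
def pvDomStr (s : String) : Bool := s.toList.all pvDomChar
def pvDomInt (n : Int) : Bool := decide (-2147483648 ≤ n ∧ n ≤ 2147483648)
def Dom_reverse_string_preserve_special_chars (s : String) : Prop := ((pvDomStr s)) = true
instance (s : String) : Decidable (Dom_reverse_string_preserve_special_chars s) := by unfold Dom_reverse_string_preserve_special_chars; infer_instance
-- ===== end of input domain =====

-- B replaces A's three passes (collect the alnum chars, reverse them, rebuild with a
-- running index) by a single two-pointer converging swap over a list copy; same cost,
-- different algorithm. B mutates only its local list copy, so no observable side effects.

-- ===== PORT A =====
def reverse_string_preserve_special_chars (s : String) : String :=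
  let alnum_chars : List Char := s.toList.filter PySem.Chars.isalnum
  -- alnum_chars[::-1]; step -1 never raises, slice? is always some here
  let reversed_alnum_chars : List Char :=
    (PySem.List.slice? alnum_chars none none (-1)).getD []
  -- the loop with result/index state; the index is always in range (the stack holds
  -- exactly one entry per alnum char of s), so the total pyGetD form is exact
  let st := s.toList.foldl (fun (st : List Char × Int) char =>
      if PySem.Chars.isalnum char then
        (st.1 ++ [PySem.List.pyGetD reversed_alnum_chars st.2 ' '], st.2 + 1)
      else
        (st.1 ++ [char], st.2)) ([], 0)
  String.mk st.1

-- ===== PORT B =====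
-- the while-loop of Source B: i/j converge, swapping alnum chars, skipping the rest
def pvLoopB (chars : List Char) (i j : Int) : List Char :=
  if i < j then
    if ¬ PySem.Chars.isalnum (PySem.List.pyGetD chars i ' ') then
      pvLoopB chars (i + 1) j
    else if ¬ PySem.Chars.isalnum (PySem.List.pyGetD chars j ' ') then
      pvLoopB chars i (j - 1)
    else
      -- chars[i], chars[j] = chars[j], chars[i]  (both reads before both writes)
      pvLoopB
        (PySem.List.pySetD (PySem.List.pySetD chars i (PySem.List.pyGetD chars j ' '))
          j (PySem.List.pyGetD chars i ' '))
        (i + 1) (j - 1)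
  else chars
termination_by (j - i).toNat
decreasing_by all_goals omega

def reverse_string_preserve_special_chars_alt (s : String) : String :=
  String.mk (pvLoopB s.toList 0 ((s.toList.length : Int) - 1))

-- ===== PRECONDITION & SPEC =====
def Spec_reverse_string_preserve_special_chars (s : String) (out : String) : Prop := out = reverse_string_preserve_special_chars_alt s
instance (s : String) (out : String) : Decidable (Spec_reverse_string_preserve_special_chars s out) := by unfold Spec_reverse_string_preserve_special_chars; infer_instance

-- ===== CLAIM (what is proved, stated in full; the proofs are below) =====
def Claim_equal_reverse_string_preserve_special_chars : Prop := ∀ (s : String), Dom_reverse_string_preserve_special_chars s → Spec_reverse_string_preserve_special_chars s (reverse_string_preserve_special_chars s)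

-- ===== LEMMAS AND PROOFS =====

-- canonical form both ports are reduced to: fill the alnum positions of cs from the
-- stack st, keeping other chars in place
def pvFill (cs st : List Char) : List Char :=
  match cs with
  | [] => []
  | c :: cs' =>
    if PySem.Chars.isalnum c then st.headD ' ' :: pvFill cs' st.tail
    else c :: pvFill cs' st

theorem pvFoldA (rev : List Char) : ∀ (cs acc : List Char) (n : Nat),
    (cs.foldl (fun (st : List Char × Int) char =>
      if PySem.Chars.isalnum char then
        (st.1 ++ [PySem.List.pyGetD rev st.2 ' '], st.2 + 1)
      else
        (st.1 ++ [char], st.2)) (acc, (n : Int))).1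
    = acc ++ pvFill cs (rev.drop n) := by
  intro cs
  induction cs with
  | nil => intro acc n; simp [pvFill]
  | cons c cs' ih =>
    intro acc n
    by_cases hc : PySem.Chars.isalnum c = true
    · have h1 : ((n : Int) + 1) = ((n + 1 : Nat) : Int) := by push_cast; ring
      simp only [List.foldl_cons, hc, if_true, h1]
      rw [ih]
      simp [pvFill, hc, PySem.List.pyGetD_natCast,
        List.tail_drop]
    · simp only [List.foldl_cons, hc, if_false, Bool.false_eq_true]
      rw [ih]
      simp [pvFill, hc]

theorem pvA_eq_fill (s : String) :
    reverse_string_preserve_special_chars s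
      = String.mk (pvFill s.toList ((s.toList.filter PySem.Chars.isalnum).reverse)) := by
  unfold reverse_string_preserve_special_chars
  simp only [PySem.List.slice?_none_none_neg_one, Option.getD_some]
  have := pvFoldA ((s.toList.filter PySem.Chars.isalnum).reverse) s.toList [] 0
  simp only [Nat.cast_zero, List.drop_zero] at this
  rw [this]
  simp

theorem pvFill_append : ∀ (xs ys st1 st2 : List Char),
    st1.length = (xs.filter PySem.Chars.isalnum).length →
    pvFill (xs ++ ys) (st1 ++ st2) = pvFill xs st1 ++ pvFill ys st2 := by
  intro xs
  induction xs with
  | nil =>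
    intro ys st1 st2 h
    have : st1 = [] := List.eq_nil_of_length_eq_zero (by simpa using h)
    simp [this, pvFill]
  | cons c xs' ih =>
    intro ys st1 st2 h
    by_cases hc : PySem.Chars.isalnum c = true
    · rw [List.filter_cons_of_pos hc] at h
      cases st1 with
      | nil => simp at h
      | cons s1 t1 =>
        simp only [List.cons_append, pvFill, hc, if_true,
          List.headD_cons, List.tail_cons]
        rw [ih ys t1 st2 (by simpa using h)]
    · rw [List.filter_cons_of_neg (by simp [hc])] at h
      simp only [List.cons_append, pvFill, hc, Bool.false_eq_true, if_false]
      rw [ih ys st1 st2 h]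

theorem pvTakeSnoc (l : List Char) (n : Nat) (h : n < l.length) :
    l.take (n + 1) = l.take n ++ [l[n]] := by
  rw [List.take_add_one, List.getElem?_eq_getElem h]
  rfl

theorem pvDropGet (l : List Char) (m k j : Nat) (hj : j < l.length)
    (hmk : m + k = j) (h : k < (l.drop m).length) : (l.drop m)[k] = l[j] := by
  rw [List.getElem_drop]
  subst hmk
  rfl

theorem pvFill_single (c : Char) :
    pvFill [c] ((List.filter PySem.Chars.isalnum [c]).reverse) = [c] := by
  by_cases hc : PySem.Chars.isalnum c = true <;> simp [pvFill, hc]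

-- loop invariant: pvLoopB on [a,b] rewrites exactly the segment, by pvFill
theorem pvLoopB_inv : ∀ (N : Nat) (arr : List Char) (a b : Nat),
    b < arr.length → a ≤ b + 1 → b + 1 - a ≤ N →
    pvLoopB arr (a : Int) (b : Int)
      = arr.take a
        ++ pvFill ((arr.drop a).take (b + 1 - a))
            ((((arr.drop a).take (b + 1 - a)).filter PySem.Chars.isalnum).reverse)
        ++ arr.drop (b + 1) := by
  intro N
  induction N with
  | zero =>
    intro arr a b hb hab hN
    have ha : a = b + 1 := by omega
    rw [pvLoopB]
    simp [ha, pvFill, List.take_append_drop]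
  | succ N ih =>
    intro arr a b hb hab hN
    by_cases hlt : a < b
    · have hbl : b < arr.length := hb
      have hal : a < arr.length := by omega
      have hga : PySem.List.pyGetD arr (a : Int) ' ' = arr[a] := by
        simp [PySem.List.pyGetD_natCast, List.getElem?_eq_getElem hal]
      have hgb : PySem.List.pyGetD arr (b : Int) ' ' = arr[b] := by
        simp [PySem.List.pyGetD_natCast, List.getElem?_eq_getElem hbl]
      have hdropa : arr.drop a = arr[a] :: arr.drop (a + 1) :=
        List.drop_eq_getElem_cons hal
      -- seg = arr[a] :: seg'
      have hseg : (arr.drop a).take (b + 1 - a)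
          = arr[a] :: (arr.drop (a + 1)).take (b - a) := by
        rw [hdropa]
        have h1 : b + 1 - a = (b - a) + 1 := by omega
        rw [h1, List.take_succ_cons]
      rw [pvLoopB]
      rw [if_pos (by exact_mod_cast hlt)]
      by_cases hxa : PySem.Chars.isalnum arr[a] = true
      · by_cases hyb : PySem.Chars.isalnum arr[b] = true
        · -- swap case
          rw [hga, hgb, if_neg (by simp [hxa]), if_neg (by simp [hyb])]
          have hb1 : (1:Nat) ≤ b := by omega
          have hc1 : ((a : Int) + 1) = ((a + 1 : Nat) : Int) := by push_cast; ring
          have hc2 : ((b : Int) - 1) = ((b - 1 : Nat) : Int) := by push_cast [hb1]; ring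
          set E : List Char :=
            (arr.take a ++ [arr[b]]) ++ (arr.drop (a + 1)).set (b - a - 1) arr[a] with hE
          have hlen' : (arr.drop (a+1)).length = arr.length - a - 1 := by
            rw [List.length_drop]
            omega
          have harr' :
              PySem.List.pySetD (PySem.List.pySetD arr (a : Int) arr[b]) (b : Int) arr[a]
                = E := by
            simp only [PySem.List.pySetD_natCast]
            rw [List.set_eq_take_cons_drop arr[b] hal]
            have hblen : b ≥ (arr.take a).length + 1 := by simp; omega
            rw [List.set_append]
            rw [if_neg (by simp; omega)]
            have : (b - (arr.take a).length) = (b - a) := by simp; omega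
            rw [this]
            have hba : b - a = (b - a - 1) + 1 := by omega
            rw [hba, List.set_cons_succ]
            simp [hE]
          rw [harr', hc1, hc2]
          have hElen : E.length = arr.length := by
            simp [hE]
            omega
          have hpre : ((arr.take a ++ [arr[b]]) : List Char).length = a + 1 := by
            simp; omega
          have hih := ih E (a + 1) (b - 1)
            (by omega) (by omega) (by omega)
          rw [hih]
          -- identify the pieces of E
          have hEtake : E.take (a + 1) = arr.take a ++ [arr[b]] := by
            rw [hE, List.take_left' hpre]
          have hEdropA : E.drop (a + 1) = (arr.drop (a + 1)).set (b - a - 1) arr[a] := by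
            rw [hE, List.drop_left' hpre]
          have hmid : (E.drop (a + 1)).take ((b - 1) + 1 - (a + 1))
              = (arr.drop (a + 1)).take (b - a - 1) := by
            rw [hEdropA]
            have h1 : (b - 1) + 1 - (a + 1) = b - a - 1 := by omega
            rw [h1, List.take_set]
            apply List.set_eq_of_length_le
            simp
          have hdropb : (arr.drop (a+1)).drop (b - a - 1) = arr.drop b := by
            rw [List.drop_drop]
            congr 1
            omega
          have hEdropB : E.drop ((b - 1) + 1) = arr[a] :: arr.drop (b + 1) := by
            have hdd : (E.drop (a + 1)).drop (b - a - 1) = E.drop ((b - 1) + 1) := by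
              rw [List.drop_drop]
              congr 1
              omega
            rw [← hdd, hEdropA, List.drop_set, hdropb]
            rw [Nat.sub_self, List.drop_eq_getElem_cons hbl, List.set_cons_zero]
            simp
          rw [hEtake, hmid, hEdropB]
          -- now the right-hand side: decompose seg = arr[a] :: mid ++ [arr[b]]
          have hmid2 : (arr.drop (a + 1)).take (b - a)
              = (arr.drop (a + 1)).take (b - a - 1) ++ [arr[b]] := by
            have hix : b - a - 1 < (arr.drop (a+1)).length := by
              rw [List.length_drop]; omega
            have h' := pvTakeSnoc (arr.drop (a+1)) (b - a - 1) hix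
            rw [pvDropGet arr (a+1) (b-a-1) b hbl (by omega) hix] at h'
            rw [show b - a - 1 + 1 = b - a from by omega] at h'
            exact h'
          rw [hseg, hmid2]
          set mid := (arr.drop (a + 1)).take (b - a - 1) with hmidd
          have hfil : ((arr[a] :: (mid ++ [arr[b]])).filter PySem.Chars.isalnum).reverse
              = arr[b] :: ((mid.filter PySem.Chars.isalnum).reverse ++ [arr[a]]) := by
            simp [hxa, hyb]
          rw [hfil]
          show (arr.take a ++ [arr[b]]) ++
              pvFill mid ((mid.filter PySem.Chars.isalnum).reverse) ++
              (arr[a] :: arr.drop (b + 1))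
            = arr.take a ++
              pvFill (arr[a] :: (mid ++ [arr[b]]))
                (arr[b] :: ((mid.filter PySem.Chars.isalnum).reverse ++ [arr[a]])) ++
              arr.drop (b + 1)
          have hfill : pvFill (arr[a] :: (mid ++ [arr[b]]))
                (arr[b] :: ((mid.filter PySem.Chars.isalnum).reverse ++ [arr[a]]))
              = arr[b] :: (pvFill mid ((mid.filter PySem.Chars.isalnum).reverse) ++ [arr[a]]) := by
            simp only [pvFill, hxa, if_true, List.headD_cons, List.tail_cons]
            rw [pvFill_append mid [arr[b]]
              ((mid.filter PySem.Chars.isalnum).reverse) [arr[a]] (by simp)]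
            simp [pvFill, hyb]
          rw [hfill]
          simp
        · -- right end not alnum: j -= 1
          rw [hga, hgb, if_neg (by simp [hxa]), if_pos (by simp [hyb])]
          have hb1 : (1:Nat) ≤ b := by omega
          have hc2 : ((b : Int) - 1) = ((b - 1 : Nat) : Int) := by push_cast [hb1]; ring
          rw [hc2]
          rw [ih arr a (b - 1) (by omega) (by omega) (by omega)]
          have h1 : (b - 1) + 1 - a = b - a := by omega
          rw [h1]
          have hseg2 : (arr.drop a).take (b + 1 - a)
              = (arr.drop a).take (b - a) ++ [arr[b]] := by
            have hix : b - a < (arr.drop a).length := by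
              rw [List.length_drop]; omega
            have h' := pvTakeSnoc (arr.drop a) (b - a) hix
            rw [pvDropGet arr a (b-a) b hbl (by omega) hix] at h'
            rw [show b - a + 1 = b + 1 - a from by omega] at h'
            exact h'
          rw [hseg2]
          set seg2 := (arr.drop a).take (b - a) with hseg2d
          have hfil : ((seg2 ++ [arr[b]]).filter PySem.Chars.isalnum).reverse
              = (seg2.filter PySem.Chars.isalnum).reverse := by
            simp [List.filter_append, hyb]
          rw [hfil]
          have hfill : pvFill (seg2 ++ [arr[b]]) ((seg2.filter PySem.Chars.isalnum).reverse)
              = pvFill seg2 ((seg2.filter PySem.Chars.isalnum).reverse) ++ [arr[b]] := by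
            have := pvFill_append seg2 [arr[b]]
              ((seg2.filter PySem.Chars.isalnum).reverse) [] (by simp)
            simp only [List.append_nil] at this
            rw [this]
            simp [pvFill, hyb]
          rw [hfill]
          have hdb : arr.drop b = arr[b] :: arr.drop (b + 1) :=
            List.drop_eq_getElem_cons hbl
          have h2 : (b - 1) + 1 = b := by omega
          rw [h2, hdb]
          simp
      · -- left end not alnum: i += 1
        rw [hga, if_pos (by simp [hxa])]
        have hc1 : ((a : Int) + 1) = ((a + 1 : Nat) : Int) := by push_cast; ring
        rw [hc1]
        rw [ih arr (a + 1) b (by omega) (by omega) (by omega)]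
        rw [hseg]
        have h1 : b + 1 - (a + 1) = b - a := by omega
        rw [h1]
        set seg' := (arr.drop (a + 1)).take (b - a) with hseg'
        have hfil : ((arr[a] :: seg').filter PySem.Chars.isalnum).reverse
            = (seg'.filter PySem.Chars.isalnum).reverse := by
          simp [hxa]
        have hfill : pvFill (arr[a] :: seg') ((seg'.filter PySem.Chars.isalnum).reverse)
            = arr[a] :: pvFill seg' ((seg'.filter PySem.Chars.isalnum).reverse) := by
          simp [pvFill, hxa]
        rw [hfil, hfill, pvTakeSnoc arr a hal]
        simp only [List.append_assoc, List.cons_append, List.nil_append]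
    · -- loop exit: a = b or a = b + 1
      rw [pvLoopB]
      rw [if_neg (by exact_mod_cast hlt)]
      rcases (by omega : a = b + 1 ∨ a = b) with ha | ha
      · simp [ha, pvFill, List.take_append_drop]
      · subst ha
        have hal : a < arr.length := hb
        have hseg1 : (arr.drop a).take (a + 1 - a) = [arr[a]] := by
          have : a + 1 - a = 1 := by omega
          rw [this, List.drop_eq_getElem_cons hal]
          rfl
        rw [hseg1, pvFill_single, ← pvTakeSnoc arr a hal, List.take_append_drop]

theorem pvB_eq_fill (s : String) :
    reverse_string_preserve_special_chars_alt s
      = String.mk (pvFill s.toList ((s.toList.filter PySem.Chars.isalnum).reverse)) := by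
  unfold reverse_string_preserve_special_chars_alt
  cases hcs : s.toList with
  | nil =>
    rw [pvLoopB]
    norm_num [pvFill]
  | cons c t =>
    have hlen : 1 ≤ s.toList.length := by rw [hcs]; simp
    have hc : ((s.toList.length : Int) - 1) = ((s.toList.length - 1 : Nat) : Int) := by
      push_cast [hlen]; ring
    rw [← hcs, hc]
    have h0 : (0 : Int) = ((0 : Nat) : Int) := rfl
    rw [h0, pvLoopB_inv s.toList.length s.toList 0 (s.toList.length - 1)
      (by omega) (by omega) (by omega)]
    have h2 : s.length - 1 + 1 = s.toList.length := by
      simp only [String.length_toList] at *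
      omega
    simp [h2]
    rw [← String.length_toList, List.take_length, List.drop_length, List.append_nil]

-- ===== VERDICT (by name: the statement is the Claim_ definition above) =====
theorem reverse_string_preserve_special_chars_spec : Claim_equal_reverse_string_preserve_special_chars := by
  intro s _
  show _ = _
  rw [pvA_eq_fill, pvB_eq_fill]
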